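-- pv_equiv track=rewrite | github.com/AmitMali/python5pmJuly23 | sam-weet-proble..py | max_sweets
-- ===== SOURCE A (Python) =====
-- def max_sweets(n, A, B, m, C):
--     sweets = list(zip(A, B))  # Combine the time and sweetness levels for each sweet
--     sweets.sort(key=lambda x: x[1], reverse=True)  # Sort sweets in descending order of sweetness
--
--     total_sweets = 0
--     total_sweetness = 0
--
--     for i in range(n):
--         sweet_time, sweet_sweetness = sweets[i]
--
--         # Find the day with maximum available time that can be used to make the current sweet
--         max_time_day = -1
--         max_time_available = 0
--         for j in range(m):
--             if C[j] >= sweet_time and C[j] > max_time_available: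
--                 max_time_available = C[j]
--                 max_time_day = j
--
--         # If a suitable day is found, make the sweet and update the totals
--         if max_time_day != -1:
--             total_sweets += 1
--             total_sweetness += sweet_sweetness
--             C[max_time_day] = 0  # Mark the day as used
--
--     return total_sweets, total_sweetness
-- ===== SOURCE B (Python) =====
-- def max_sweets(n, A, B, m, C):
--     # Return-value equivalent to A (A mutates C in place; B does not touch C).
--     sweets = sorted(zip(A, B), key=lambda s: s[1], reverse=True)[:max(n, 0)]
--     days = sorted(C[:max(m, 0)], reverse=True)
--     count = 0
--     sweetness = 0
--     i = 0
--     for t, s in sweets: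
--         if i < len(days) and days[i] >= t and days[i] > 0:
--             count += 1
--             sweetness += s
--             i += 1
--     return count, sweetness
-- ===== Notes on version B (the rewrite author's own statement) =====
-- stated objective: faster
-- what changed: Replaced the O(n*m) inner scan (find the max remaining day and zero it out in C) by sorting the days descending once and consuming them with a single pointer, one comparison per sweet; B does not mutate C.
import Mathlib
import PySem

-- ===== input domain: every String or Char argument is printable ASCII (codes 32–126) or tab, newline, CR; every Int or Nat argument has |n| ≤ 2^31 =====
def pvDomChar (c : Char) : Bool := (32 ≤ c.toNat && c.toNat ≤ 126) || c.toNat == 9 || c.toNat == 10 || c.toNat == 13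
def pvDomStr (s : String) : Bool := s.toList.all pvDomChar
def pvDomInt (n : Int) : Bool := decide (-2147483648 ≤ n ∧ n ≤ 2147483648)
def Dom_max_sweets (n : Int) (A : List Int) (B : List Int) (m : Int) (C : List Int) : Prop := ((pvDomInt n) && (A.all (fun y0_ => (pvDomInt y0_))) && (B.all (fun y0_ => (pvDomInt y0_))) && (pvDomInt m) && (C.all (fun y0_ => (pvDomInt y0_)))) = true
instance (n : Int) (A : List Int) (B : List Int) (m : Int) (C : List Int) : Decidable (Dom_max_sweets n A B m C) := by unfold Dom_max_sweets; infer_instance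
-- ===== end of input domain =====

-- B replaces A's repeated O(m) scan for the best remaining day by a one-time descending
-- sort of the days consumed with a single pointer. A mutates C in place (zeroes used
-- days); B does not — the equivalence proved here is about the RETURN value only.

-- ===== PORT A =====
-- inner loop 'for j in range(m)': state (max_time_day, max_time_available);
-- C[j] ported as pyGetD (in range under Pre_max_sweets, where Python does not raise)
def pvInnerF (Cc : List Int) (t : Int) (st : Int × Int) (j : Int) : Int × Int :=
  let cj := PySem.List.pyGetD Cc j 0
  if t ≤ cj ∧ st.2 < cj then (j, cj) else st

def pvInner (Cc : List Int) (m : Int) (t : Int) : Int × Int :=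
  (PySem.List.pyRange 0 m 1).foldl (pvInnerF Cc t) (-1, 0)

-- one iteration of 'for i in range(n)': r.1 ≥ 0 whenever r.1 ≠ -1 (it comes from
-- range(m)), so C[max_time_day] = 0 is List.set r.1.toNat
def pvOuterStep (m : Int) (st : List Int × Int × Int) (sw : Int × Int) : List Int × Int × Int :=
  let r := pvInner st.1 m sw.1
  if r.1 ≠ -1 then (st.1.set r.1.toNat 0, st.2.1 + 1, st.2.2 + sw.2) else st

def max_sweets (n : Int) (A : List Int) (B : List Int) (m : Int) (C : List Int) : Int × Int :=
  let sweets := PySem.List.sorted (A.zip B) (fun x => x.2) true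
  -- sweets[i] ported as pyGetD (in range under Pre_max_sweets)
  let fin := (PySem.List.pyRange 0 n 1).foldl
      (fun st i => pvOuterStep m st (PySem.List.pyGetD sweets i (0, 0))) (C, 0, 0)
  (fin.2.1, fin.2.2)

-- ===== PORT B =====
def pvBStep (days : List Int) (st : Nat × Int × Int) (sw : Int × Int) : Nat × Int × Int :=
  if st.1 < days.length ∧ sw.1 ≤ days.getD st.1 0 ∧ 0 < days.getD st.1 0
  then (st.1 + 1, st.2.1 + 1, st.2.2 + sw.2) else st

-- Python slices with a clamped non-negative bound: xs[:max(k,0)] = List.take (max k 0).toNat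
def max_sweets_alt (n : Int) (A : List Int) (B : List Int) (m : Int) (C : List Int) : Int × Int :=
  let sweets := (PySem.List.sorted (A.zip B) (fun x => x.2) true).take (max n 0).toNat
  let days := PySem.List.sorted (C.take (max m 0).toNat) (fun x => x) true
  let fin := sweets.foldl (pvBStep days) (0, 0, 0)
  (fin.2.1, fin.2.2)

-- ===== PRECONDITION & SPEC =====
-- Pre_ excludes exactly the inputs where Python A raises IndexError: sweets[i] with
-- n > min(len A, len B), or C[j] with 0 < n and m > len C.
def Pre_max_sweets (n : Int) (A : List Int) (B : List Int) (m : Int) (C : List Int) : Prop :=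
  n ≤ 0 ∨ (n ≤ (A.length : Int) ∧ n ≤ (B.length : Int) ∧ m ≤ (C.length : Int))
instance (n : Int) (A : List Int) (B : List Int) (m : Int) (C : List Int) : Decidable (Pre_max_sweets n A B m C) := by unfold Pre_max_sweets; infer_instance

def pvWitness_max_sweets : Int × List Int × List Int × Int × List Int := (2, [3, 1], [5, 4], 2, [2, 3])

def Spec_max_sweets (n : Int) (A : List Int) (B : List Int) (m : Int) (C : List Int) (out : Int × Int) : Prop := out = max_sweets_alt n A B m C
instance (n : Int) (A : List Int) (B : List Int) (m : Int) (C : List Int) (out : Int × Int) : Decidable (Spec_max_sweets n A B m C out) := by unfold Spec_max_sweets; infer_instance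

-- ===== CLAIM (what is proved, stated in full; the proofs are below) =====
def Claim_equal_max_sweets : Prop := ∀ (n : Int) (A : List Int) (B : List Int) (m : Int) (C : List Int), Dom_max_sweets n A B m C → Pre_max_sweets n A B m C → Spec_max_sweets n A B m C (max_sweets n A B m C)


-- ===== LEMMAS AND PROOFS =====

-- characterisation of A's inner scan over range(k): either nothing eligible was seen,
-- or the state holds an eligible index of maximal value
lemma pvInner_aux (Cc : List Int) (t : Int) : ∀ (k : Nat),
    ((PySem.List.pyRange 0 (k : Int) 1).foldl (pvInnerF Cc t) (-1, 0) = (-1, 0) ∧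
       ∀ j < k, ¬(t ≤ Cc.getD j 0 ∧ 0 < Cc.getD j 0)) ∨
    (∃ jn < k, (PySem.List.pyRange 0 (k : Int) 1).foldl (pvInnerF Cc t) (-1, 0) = ((jn : Int), Cc.getD jn 0) ∧
       t ≤ Cc.getD jn 0 ∧ 0 < Cc.getD jn 0 ∧ ∀ j < k, t ≤ Cc.getD j 0 → Cc.getD j 0 ≤ Cc.getD jn 0) := by
  intro k
  induction k with
  | zero =>
    left
    rw [PySem.List.pyRange_one_eq_nil (by omega)]
    exact ⟨rfl, by omega⟩
  | succ k ih =>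
    have hcast : ((k + 1 : Nat) : Int) = (k : Int) + 1 := by push_cast; ring
    rw [hcast, PySem.List.pyRange_one_succ_right (by omega), List.foldl_append]
    set r := (PySem.List.pyRange 0 (k : Int) 1).foldl (pvInnerF Cc t) (-1, 0) with hrdef
    have hget : PySem.List.pyGetD Cc (k : Int) 0 = Cc.getD k 0 := by
      simp [PySem.List.pyGetD_natCast]
    have hnn : (0 : Int) ≤ r.2 := by
      rcases ih with ⟨h1, _⟩ | ⟨jn, _, h1, _, hp, _⟩
      · rw [h1]
      · rw [h1]; omega
    by_cases hcond : t ≤ Cc.getD k 0 ∧ r.2 < Cc.getD k 0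
    · right
      refine ⟨k, by omega, ?_, hcond.1, by omega, ?_⟩
      · simp only [List.foldl_cons, List.foldl_nil, pvInnerF, hget]
        rw [if_pos hcond]
      · intro j hj htj
        rcases Nat.lt_succ_iff_lt_or_eq.mp hj with hj' | hj'
        · rcases ih with ⟨_, h2⟩ | ⟨jn, _, h1, _, _, hmax⟩
          · by_cases hpj : 0 < Cc.getD j 0
            · exact absurd ⟨htj, hpj⟩ (h2 j hj')
            · omega
          · have hr2 : r.2 = Cc.getD jn 0 := by rw [h1]
            have := hmax j hj' htj
            omega
        · subst hj'; omega
    · rcases ih with ⟨h1, h2⟩ | ⟨jn, hjn, h1, h2, h3, hmax⟩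
      · left
        refine ⟨?_, ?_⟩
        · simp only [List.foldl_cons, List.foldl_nil, pvInnerF, hget]
          rw [if_neg hcond]
          exact h1
        intro j hj
        rcases Nat.lt_succ_iff_lt_or_eq.mp hj with hj' | hj'
        · exact h2 j hj'
        · subst hj'
          intro ⟨ha, hb⟩
          rw [h1] at hcond
          exact hcond ⟨ha, by simpa using hb⟩
      · right
        refine ⟨jn, by omega, ?_, h2, h3, ?_⟩
        · simp only [List.foldl_cons, List.foldl_nil, pvInnerF, hget]
          rw [if_neg hcond, h1]
        · intro j hj htj
          rcases Nat.lt_succ_iff_lt_or_eq.mp hj with hj' | hj'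
          · exact hmax j hj' htj
          · subst hj'
            rw [h1] at hcond
            omega

-- the invariant-preserving core: A's fold on (C-state, count, sweetness) and B's fold on
-- (pointer, count, sweetness) agree on the last two components whenever the positive
-- entries of A's remaining first-m days are a permutation of B's remaining days
lemma pvLoop_eq (m : Int) (days : List Int) (hdays : days.Pairwise (fun a b => b ≤ a)) :
    ∀ (L : List (Int × Int)) (Cc : List Int) (i : Nat) (c w : Int),
    ((Cc.take (max m 0).toNat).filter (fun x => decide (0 < x))).Perm
      ((days.drop i).filter (fun x => decide (0 < x))) →
    (L.foldl (pvOuterStep m) (Cc, c, w)).2 = (L.foldl (pvBStep days) (i, c, w)).2 := by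
  intro L
  induction L with
  | nil => intro Cc i c w _; rfl
  | cons sw L ih =>
    intro Cc i c w hPQ
    simp only [List.foldl_cons]
    have hrange : PySem.List.pyRange 0 m 1 = PySem.List.pyRange 0 (((max m 0).toNat : Nat) : Int) 1 := by
      by_cases h : m ≤ 0
      · rw [PySem.List.pyRange_one_eq_nil h, PySem.List.pyRange_one_eq_nil (by omega)]
      · congr 1; omega
    have hinner : pvInner Cc m sw.1
        = (PySem.List.pyRange 0 (((max m 0).toNat : Nat) : Int) 1).foldl (pvInnerF Cc sw.1) (-1, 0) := by
      rw [pvInner, hrange]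
    -- membership translations between getD facts and the filtered take
    have hmemP : ∀ x, x ∈ (Cc.take (max m 0).toNat).filter (fun x => decide (0 < x)) →
        ∃ j, j < (max m 0).toNat ∧ Cc.getD j 0 = x ∧ 0 < x := by
      intro x hx
      rw [List.mem_filter] at hx
      obtain ⟨j, hj, hxj⟩ := List.getElem_of_mem hx.1
      have hjm : j < (max m 0).toNat := lt_of_lt_of_le hj (by simp [List.length_take])
      have hjc : j < Cc.length := lt_of_lt_of_le hj (by simp [List.length_take])
      refine ⟨j, hjm, ?_, by simpa using hx.2⟩
      rw [List.getD_eq_getElem Cc 0 hjc, ← hxj]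
      exact List.getElem_take.symm
    have hmemP' : ∀ j, j < (max m 0).toNat → 0 < Cc.getD j 0 →
        Cc.getD j 0 ∈ (Cc.take (max m 0).toNat).filter (fun x => decide (0 < x)) := by
      intro j hj hpj
      have hjc : j < Cc.length := by
        by_contra hge
        rw [List.getD_eq_default Cc 0 (by omega)] at hpj
        omega
      have hjd : j < (Cc.take (max m 0).toNat).length := by simp [List.length_take]; omega
      rw [List.mem_filter]
      constructor
      · have : (Cc.take (max m 0).toNat)[j] = Cc.getD j 0 := by
          rw [List.getElem_take, List.getD_eq_getElem Cc 0 hjc]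
        exact this ▸ List.getElem_mem hjd
      · simpa using hpj
    rcases pvInner_aux Cc sw.1 (max m 0).toNat with ⟨h1, h2⟩ | ⟨jn, hjn, h1, ht, hp, hmax⟩
    · -- no eligible day for A; show B does not take either
      have hA : pvOuterStep m (Cc, c, w) sw = (Cc, c, w) := by
        simp only [pvOuterStep, hinner, h1]
        norm_num
      have hB : pvBStep days (i, c, w) sw = (i, c, w) := by
        simp only [pvBStep]
        rw [if_neg]
        rintro ⟨hi, hts, hpos⟩
        have hgi : days.getD i 0 = days[i] := List.getD_eq_getElem days 0 hi
        have hmem : days.getD i 0 ∈ days.drop i := by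
          rw [List.drop_eq_getElem_cons hi, hgi]
          exact List.mem_cons_self
        have hq : days.getD i 0 ∈ (days.drop i).filter (fun x => decide (0 < x)) :=
          List.mem_filter.mpr ⟨hmem, by simpa using hpos⟩
        obtain ⟨j, hj, hje, _⟩ := hmemP _ (hPQ.mem_iff.mpr hq)
        exact h2 j hj ⟨hje ▸ hts, hje ▸ hpos⟩
      rw [hA, hB]
      exact ih Cc i c w hPQ
    · -- A consumes its best day of value v := Cc.getD jn 0; B consumes days[i] = v
      set v := Cc.getD jn 0 with hv
      have hjc : jn < Cc.length := by
        by_contra hge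
        rw [hv, List.getD_eq_default Cc 0 (by omega)] at hp
        omega
      have hvP : v ∈ (Cc.take (max m 0).toNat).filter (fun x => decide (0 < x)) := hmemP' jn hjn hp
      have hvQ : v ∈ (days.drop i).filter (fun x => decide (0 < x)) := hPQ.mem_iff.mp hvP
      have hi : i < days.length := by
        by_contra hge
        rw [List.drop_eq_nil_of_le (by omega)] at hvQ
        simp at hvQ
      have hd : days.drop i = days[i] :: days.drop (i + 1) := List.drop_eq_getElem_cons hi
      have hub : ∀ y ∈ days.drop i, y ≤ days[i] := by
        intro y hy
        rw [hd] at hy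
        rcases List.mem_cons.mp hy with h | h
        · omega
        · have hpd : (days[i] :: days.drop (i + 1)).Pairwise (fun a b => b ≤ a) := by
            rw [← hd]; exact hdays.drop
          exact (List.pairwise_cons.mp hpd).1 y h
      have hvle : v ≤ days[i] := hub v (List.mem_filter.mp hvQ).1
      have hdi_mem : days[i] ∈ (days.drop i).filter (fun x => decide (0 < x)) := by
        rw [List.mem_filter, hd]
        exact ⟨List.mem_cons_self, by simp only [decide_eq_true_eq]; omega⟩
      obtain ⟨j, hj, hje, _⟩ := hmemP _ (hPQ.mem_iff.mpr hdi_mem)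
      have hdile : days[i] ≤ v := by
        have := hmax j hj (by rw [hje]; omega)
        omega
      have hiv : days[i] = v := le_antisymm hdile hvle
      have hgi : days.getD i 0 = days[i] := List.getD_eq_getElem days 0 hi
      have hA : pvOuterStep m (Cc, c, w) sw = (Cc.set jn 0, c + 1, w + sw.2) := by
        simp only [pvOuterStep, hinner, h1]
        rw [if_pos (by simp)]
        simp
      have hB : pvBStep days (i, c, w) sw = (i + 1, c + 1, w + sw.2) := by
        simp only [pvBStep]
        rw [if_pos ⟨hi, by rw [hgi, hiv]; exact ht, by rw [hgi, hiv]; exact hp⟩]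
      rw [hA, hB]
      apply ih
      -- invariant preservation: both sides lose exactly one copy of v
      have hjd : jn < (Cc.take (max m 0).toNat).length := by simp [List.length_take]; omega
      have hDjn : (Cc.take (max m 0).toNat)[jn] = v := by
        rw [List.getElem_take, hv, List.getD_eq_getElem Cc 0 hjc]
      have hsplitD : Cc.take (max m 0).toNat
          = (Cc.take (max m 0).toNat).take jn ++ v :: (Cc.take (max m 0).toNat).drop (jn + 1) := by
        conv_lhs => rw [← List.take_append_drop jn (Cc.take (max m 0).toNat)]
        rw [List.drop_eq_getElem_cons hjd, hDjn]
      have hsetD : (Cc.set jn 0).take (max m 0).toNat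
          = (Cc.take (max m 0).toNat).take jn ++ 0 :: (Cc.take (max m 0).toNat).drop (jn + 1) := by
        rw [List.take_set]
        exact List.set_eq_take_cons_drop 0 hjd
      have hP : (Cc.take (max m 0).toNat).filter (fun x => decide (0 < x))
          = ((Cc.take (max m 0).toNat).take jn).filter (fun x => decide (0 < x))
            ++ v :: ((Cc.take (max m 0).toNat).drop (jn + 1)).filter (fun x => decide (0 < x)) := by
        conv_lhs => rw [hsplitD]
        rw [List.filter_append, List.filter_cons]
        simp [hp]
      have hP' : ((Cc.set jn 0).take (max m 0).toNat).filter (fun x => decide (0 < x))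
          = ((Cc.take (max m 0).toNat).take jn).filter (fun x => decide (0 < x))
            ++ ((Cc.take (max m 0).toNat).drop (jn + 1)).filter (fun x => decide (0 < x)) := by
        rw [hsetD, List.filter_append, List.filter_cons]
        simp
      have hQ : (days.drop i).filter (fun x => decide (0 < x))
          = v :: (days.drop (i + 1)).filter (fun x => decide (0 < x)) := by
        rw [hd, List.filter_cons, hiv]
        simp [hp]
      have hcons : (v :: ((Cc.set jn 0).take (max m 0).toNat).filter (fun x => decide (0 < x))).Perm
          (v :: (days.drop (i + 1)).filter (fun x => decide (0 < x))) := by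
        rw [hP']
        refine List.Perm.trans ?_ (hQ ▸ hP ▸ hPQ)
        exact List.perm_middle.symm
      exact hcons.cons_inv

-- A's outer loop 'for i in range(k)' over sweets[i] is the fold over the first k sweets
lemma pvFold_range_take {α β : Type} (f : β → α → β) (S : List α) (d : α) (k : Nat)
    (hk : k ≤ S.length) (init : β) :
    (PySem.List.pyRange 0 (k : Int) 1).foldl (fun st i => f st (PySem.List.pyGetD S i d)) init
      = (S.take k).foldl f init := by
  have hlen : ((S.take k).length : Int) = (k : Int) := by
    simp [List.length_take]; omega
  have hcongr : ∀ (st : β) (i : Int), i ∈ PySem.List.pyRange 0 (k : Int) 1 →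
      f st (PySem.List.pyGetD S i d) = f st (PySem.List.pyGetD (S.take k) i d) := by
    intro st i hi
    rw [PySem.List.mem_pyRange_one] at hi
    have hik : i.toNat < k := by omega
    have hisl : i.toNat < S.length := by omega
    have hitk : i.toNat < (S.take k).length := by simp [List.length_take]; omega
    rw [PySem.List.pyGetD_eq_getElem S d hi.1 (by omega),
        PySem.List.pyGetD_eq_getElem (S.take k) d hi.1 (by omega)]
    congr 1
    exact List.getElem_take.symm
  have h1 := PySem.List.foldl_congr_mem (PySem.List.pyRange 0 (k : Int) 1)
      (fun st i => f st (PySem.List.pyGetD S i d))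
      (fun st i => f st (PySem.List.pyGetD (S.take k) i d)) init hcongr
  rw [h1, ← hlen]
  exact PySem.List.foldl_pyRange_zero_pyGetD' (S.take k) d f init

-- ===== VERDICT (by name: the statement is the Claim_ definition above) =====
theorem max_sweets_spec : Claim_equal_max_sweets := by
  intro n A B m C _ hpre
  unfold Spec_max_sweets
  simp only [max_sweets, max_sweets_alt]
  by_cases hn : n ≤ 0
  · rw [PySem.List.pyRange_one_eq_nil hn]
    have h0 : (max n 0).toNat = 0 := by omega
    rw [h0]
    simp
  · push Not at hn
    rcases hpre with h | ⟨hA, hB, hC⟩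
    · omega
    have hSlen : (PySem.List.sorted (A.zip B) (fun x => x.2) true).length = min A.length B.length := by
      rw [PySem.List.length_sorted, List.length_zip]
    have hk : n.toNat ≤ (PySem.List.sorted (A.zip B) (fun x => x.2) true).length := by
      rw [hSlen]; omega
    have hmaxn : (max n 0).toNat = n.toNat := by omega
    have hr : PySem.List.pyRange 0 n 1 = PySem.List.pyRange 0 ((n.toNat : Nat) : Int) 1 := by
      congr 1; omega
    rw [hmaxn, hr,
      pvFold_range_take (pvOuterStep m) (PySem.List.sorted (A.zip B) (fun x => x.2) true) (0, 0)
        n.toNat hk (C, 0, 0)]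
    have hpair : (PySem.List.sorted (C.take (max m 0).toNat) (fun x => x) true).Pairwise
        (fun a b => b ≤ a) := by
      have := PySem.List.sorted_pairwise_rev (C.take (max m 0).toNat) (fun x => x)
      simpa using this
    have hperm : ((C.take (max m 0).toNat).filter (fun x => decide (0 < x))).Perm
        (((PySem.List.sorted (C.take (max m 0).toNat) (fun x => x) true).drop 0).filter
          (fun x => decide (0 < x))) := by
      rw [List.drop_zero]
      exact ((PySem.List.sorted_perm (C.take (max m 0).toNat) (fun x => x) true).filter _).symm
    have hmain := pvLoop_eq m (PySem.List.sorted (C.take (max m 0).toNat) (fun x => x) true) hpair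
      ((PySem.List.sorted (A.zip B) (fun x => x.2) true).take n.toNat) C 0 0 0 hperm
    rw [Prod.ext_iff]
    exact ⟨congrArg Prod.fst hmain, congrArg Prod.snd hmain⟩
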